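-- pv_equiv track=rewrite | github.com/wingskh/CompetitiveProgrammingExercises | Mock_Google_Interview_Questions/PhoneNumberLetterSubstring.py | PhoneNumberLetterSubstring
-- ===== SOURCE A (Python) =====
-- def is_subseq(phone_number, word):
--     pointer = 0
--     for number in phone_number:
--         if word[pointer] == number:
--             pointer += 1
--         if pointer == len(word):
--             return True
--     return False
--
-- def PhoneNumberLetterSubstring(phone_number, word_list):
--     letters = {
--         "2": ["a", "b", "c"],
--         "3": ["d", "e", "f"],
--         "4": ["g", "h", "i"],
--         "5": ["j", "k", "l"],
--         "6": ["m", "n", "o"],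
--         "7": ["p", "q", "r", "s"],
--         "8": ["t", "u", "v"],
--         "9": ["w", "x", "y", "z"],
--     }
--
--     numeric_word_list = []
--     # O(total chars in words)
--     for word in word_list:
--         numeric_word = ""
--         for char in word:
--             for key in letters:
--                 if char in letters[key]:
--                     numeric_word += key
--                     break
--         numeric_word_list.append(numeric_word)
--
--     # O(length of words * length of phone number *)
--     return [
--         word_list[i]
--         for i in range(len(numeric_word_list))
--         if is_subseq(phone_number, numeric_word_list[i])
--     ]
-- ===== SOURCE B (Python) =====
-- # Precomputed next-occurrence automaton over the phone number: a backward DP builds,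
-- # for every position i, a dict of the next index >= i of each digit; each word is then
-- # matched by O(1) table jumps per character, never re-scanning the phone number.
--
-- _DIGITS = "22233344455566677778889999"
--
--
-- def _digit(ch):
--     return _DIGITS[ord(ch) - 97] if 'a' <= ch <= 'z' else None
--
--
-- def PhoneNumberLetterSubstring(phone_number, word_list):
--     n = len(phone_number)
--     nxt = [None] * (n + 1)
--     nxt[n] = {}
--     for i in range(n - 1, -1, -1):
--         e = dict(nxt[i + 1])
--         e[phone_number[i]] = i
--         nxt[i] = e
--
--     result = []
--     for word in word_list:
--         pos = 0
--         for ch in word: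
--             d = _digit(ch)
--             if d is None:
--                 continue
--             j = nxt[pos].get(d)
--             if j is None:
--                 pos = None
--                 break
--             pos = j + 1
--         if pos is not None:
--             result.append(word)
--     return result
-- ===== Notes on version B (the rewrite author's own statement) =====
-- stated objective: faster
-- what changed: A translates every word to a digit string and runs a pointer scan over the whole phone number per word; B instead precomputes, by one backward pass over the phone number, a next-occurrence table (for each position, the next index of each digit) and matches every word by O(1) table jumps per character, so the per-word scan of the phone number disappears.
-- outside the precondition, e.g. on PhoneNumberLetterSubstring('', ['!']): A returns [], B returns ['!']; on PhoneNumberLetterSubstring('2', ['!']): A raises IndexError, B returns ['!']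
import Mathlib
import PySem

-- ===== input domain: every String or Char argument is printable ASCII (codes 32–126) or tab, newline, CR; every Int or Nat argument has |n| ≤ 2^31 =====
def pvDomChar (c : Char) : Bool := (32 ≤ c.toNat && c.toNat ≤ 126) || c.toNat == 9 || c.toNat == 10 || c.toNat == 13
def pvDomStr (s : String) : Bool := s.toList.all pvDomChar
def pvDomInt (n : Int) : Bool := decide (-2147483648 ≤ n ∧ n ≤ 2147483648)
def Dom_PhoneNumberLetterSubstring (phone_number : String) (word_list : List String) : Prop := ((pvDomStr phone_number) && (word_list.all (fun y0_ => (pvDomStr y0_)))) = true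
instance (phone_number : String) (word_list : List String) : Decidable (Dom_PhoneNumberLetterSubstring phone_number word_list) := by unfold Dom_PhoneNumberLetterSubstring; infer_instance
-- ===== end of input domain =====

-- B replaces A's per-word pointer scan of the phone number by a next-occurrence table
-- precomputed once over the phone number; each word is matched by table jumps
-- (objective: faster — the per-word scan of the phone number disappears).

-- ===== PORT A =====
-- A's `letters` dict, as its ordered (key, letter-list) pairs
def pvLettersA : List (Char × List Char) :=
  [('2', ['a','b','c']), ('3', ['d','e','f']), ('4', ['g','h','i']), ('5', ['j','k','l']),
   ('6', ['m','n','o']), ('7', ['p','q','r','s']), ('8', ['t','u','v']), ('9', ['w','x','y','z'])]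

-- `for key in letters: if char in letters[key]: … break` — first key whose list contains char
def pvKeyOfA (char : Char) : List (Char × List Char) → Option Char
  | [] => none
  | (key, ls) :: rest => if ls.contains char then some key else pvKeyOfA char rest

-- `numeric_word = ""; for char in word: … numeric_word += key`
def pvTranslateA (word : List Char) : List Char :=
  word.foldl (fun numeric_word char =>
    match pvKeyOfA char pvLettersA with
    | some key => numeric_word ++ [key]
    | none => numeric_word) []

-- is_subseq's loop over phone_number with `pointer` into word.
-- word[pointer] is read via pyGetD: it is in range on every input Pre_ admits
-- (the numeric word is nonempty, and pointer == len(word) returns True before the next read).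
def pvIsSubseqGo (word : List Char) : List Char → Nat → Bool
  | [], _ => false
  | number :: rest, pointer =>
      let pointer' := if PySem.List.pyGetD word (pointer : Int) ' ' == number then pointer + 1 else pointer
      if pointer' == word.length then true else pvIsSubseqGo word rest pointer'

def pvIsSubseqA (phone_number word : List Char) : Bool := pvIsSubseqGo word phone_number 0

def PhoneNumberLetterSubstring (phone_number : String) (word_list : List String) : List String :=
  let numeric_word_list := word_list.foldl (fun acc word => acc ++ [pvTranslateA word.toList]) []
  (PySem.List.pyRange 0 (numeric_word_list.length : Int) 1).foldl
    (fun acc i =>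
      if pvIsSubseqA phone_number.toList (PySem.List.pyGetD numeric_word_list i []) then
        acc ++ [PySem.List.pyGetD word_list i ""]
      else acc) []

-- ===== PORT B =====
-- Source B's `_digit`: a closed-form range test + index into the _DIGITS string
-- (pyGet? = Python's DIGITS[…]; in range whenever the branch is taken)
def pvDigitB (ch : Char) : Option Char :=
  if 'a' ≤ ch ∧ ch ≤ 'z' then PySem.Str.pyGet? "22233344455566677778889999" ((ch.toNat : Int) - 97)
  else none

-- the backward loop `for i in range(n-1, -1, -1): nxt[i] = dict(nxt[i+1]); nxt[i][phone[i]] = i`,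
-- as structural recursion on the phone suffix (head of the result = nxt[i], carrying index i)
def pvNxtTab : List Char → Int → List (PySem.Dict Char Int)
  | [], _ => [PySem.Dict.empty]
  | c :: rest, i =>
      let t := pvNxtTab rest (i + 1)
      (PySem.Dict.insert (t.headD PySem.Dict.empty) c i) :: t

-- Source B's per-word loop: `j = nxt[pos].get(d); if j is None: fail; pos = j + 1`
-- (nxt[pos] read via pyGetD; pos is always in range in Source B)
def pvMatchB (nxt : List (PySem.Dict Char Int)) : List Char → Int → Bool
  | [], _ => true
  | ch :: rest, pos =>
      match pvDigitB ch with
      | none => pvMatchB nxt rest pos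
      | some d =>
          match PySem.Dict.get? (PySem.List.pyGetD nxt pos PySem.Dict.empty) d with
          | none => false
          | some j => pvMatchB nxt rest (j + 1)

def PhoneNumberLetterSubstring_alt (phone_number : String) (word_list : List String) : List String :=
  let nxt := pvNxtTab phone_number.toList 0
  word_list.foldl (fun result word =>
    if pvMatchB nxt word.toList 0 then result ++ [word] else result) []

-- ===== PRECONDITION & SPEC =====
def pvLowerLetters : List Char :=
  ['a','b','c','d','e','f','g','h','i','j','k','l','m','n','o','p','q','r','s','t','u','v','w','x','y','z']

-- Pre_ excludes inputs where some word contains no lowercase letter a–z (empty dialpad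
-- translation): there A raises IndexError (word[0] in is_subseq) whenever phone_number is
-- nonempty, and on the empty phone number whether such a letterless word "matches" is an
-- unspecified corner (A drops it, B keeps it as trivially matching).
def Pre_PhoneNumberLetterSubstring (phone_number : String) (word_list : List String) : Prop :=
  word_list.all (fun word => word.toList.any (fun c => pvLowerLetters.contains c)) = true
instance (phone_number : String) (word_list : List String) : Decidable (Pre_PhoneNumberLetterSubstring phone_number word_list) := by unfold Pre_PhoneNumberLetterSubstring; infer_instance

def pvWitness_PhoneNumberLetterSubstring : String × List String := ("2a3", ["ad", "da", "x!"])

def Spec_PhoneNumberLetterSubstring (phone_number : String) (word_list : List String) (out : List String) : Prop := out = PhoneNumberLetterSubstring_alt phone_number word_list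
instance (phone_number : String) (word_list : List String) (out : List String) : Decidable (Spec_PhoneNumberLetterSubstring phone_number word_list out) := by unfold Spec_PhoneNumberLetterSubstring; infer_instance

-- ===== CLAIM (what is proved, stated in full; the proofs are below) =====
def Claim_equal_PhoneNumberLetterSubstring : Prop := ∀ (phone_number : String) (word_list : List String), Dom_PhoneNumberLetterSubstring phone_number word_list → Pre_PhoneNumberLetterSubstring phone_number word_list → Spec_PhoneNumberLetterSubstring phone_number word_list (PhoneNumberLetterSubstring phone_number word_list)

-- ===== LEMMAS AND PROOFS =====

-- common reference: the standard greedy subsequence check, recursing on the phone number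
def pvSubG : List Char → List Char → Bool
  | _, [] => true
  | [], _ :: _ => false
  | p :: ps, w :: ws => if w == p then pvSubG ps ws else pvSubG ps (w :: ws)

theorem pvSubG_nil_right (l : List Char) : pvSubG l [] = true := by
  cases l <;> rfl

-- A's pointer loop is the greedy check on the not-yet-matched suffix of the word
theorem pvIsSubseqGo_eq (p : List Char) : ∀ (w : List Char) (ptr : Nat), ptr < w.length →
    pvIsSubseqGo w p ptr = pvSubG p (w.drop ptr) := by
  induction p with
  | nil =>
    intro w ptr h
    cases hd : w.drop ptr with
    | nil => rw [List.drop_eq_nil_iff] at hd; omega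
    | cons a t => simp [pvIsSubseqGo, pvSubG]
  | cons c cs ih =>
    intro w ptr h
    have hget : PySem.List.pyGetD w (ptr : Int) ' ' = w[ptr] := by
      rw [PySem.List.pyGetD_natCast, List.getD_eq_getElem?_getD, List.getElem?_eq_getElem h]
      rfl
    have hdrop : w.drop ptr = w[ptr] :: w.drop (ptr + 1) := (List.getElem_cons_drop h).symm
    rw [pvIsSubseqGo, hdrop, pvSubG, hget]
    cases hec : (w[ptr] == c) with
    | false =>
      simp only [Bool.false_eq_true, if_false]
      rw [if_neg (by simp; omega), ← hdrop]
      exact ih w ptr h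
    | true =>
      simp only [if_true]
      by_cases hl : ptr + 1 = w.length
      · rw [if_pos (by simp [hl])]
        have hnil : w.drop (ptr + 1) = [] := List.drop_eq_nil_iff.2 (by omega)
        rw [hnil, pvSubG_nil_right]
      · rw [if_neg (by simp; omega)]
        exact ih w (ptr + 1) (by omega)

-- the greedy check consumes the first occurrence of the leading digit
theorem pvSubG_cons_find (d : Char) (ws : List Char) : ∀ (l : List Char),
    pvSubG l (d :: ws) = (match l.findIdx? (· == d) with
      | none => false
      | some k => pvSubG (l.drop (k + 1)) ws) := by
  intro l
  induction l with
  | nil => rfl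
  | cons c cs ih =>
    by_cases hdc : d = c
    · subst hdc
      rw [pvSubG]
      simp [List.findIdx?_cons]
    · have h1 : (d == c) = false := by simpa using hdc
      have h2 : (c == d) = false := by simpa using Ne.symm hdc
      rw [pvSubG, h1]
      simp only [List.findIdx?_cons, h2, if_false, Bool.false_eq_true]
      rw [ih]
      cases hcs : cs.findIdx? (· == d) with
      | none => simp
      | some k => simp [List.drop_succ_cons]

-- lowercase characters are exactly the members of pvLowerLetters
theorem pvLower_toNat : ∀ k, k < 26 → (pvLowerLetters.getD k ' ').toNat = 97 + k := by decide

theorem pvMem_lower_of_range (c : Char) (h1 : 'a' ≤ c) (h2 : c ≤ 'z') : c ∈ pvLowerLetters := by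
  have hn : 97 ≤ c.toNat ∧ c.toNat ≤ 122 := by
    rw [Char.le_def] at h1 h2
    rw [UInt32.le_iff_toNat_le] at h1 h2
    exact ⟨h1, h2⟩
  have hk : c.toNat - 97 < 26 := by omega
  have he := pvLower_toNat (c.toNat - 97) hk
  have hlen : c.toNat - 97 < pvLowerLetters.length := by
    simpa [pvLowerLetters] using hk
  have hgd : pvLowerLetters.getD (c.toNat - 97) ' ' = pvLowerLetters[c.toNat - 97] := by
    rw [List.getD_eq_getElem?_getD, List.getElem?_eq_getElem hlen]; rfl
  have hce : pvLowerLetters[c.toNat - 97] = c := by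
    have htn : (pvLowerLetters[c.toNat - 97]).toNat = c.toNat := by rw [← hgd, he]; omega
    have hv : (pvLowerLetters[c.toNat - 97]).val = c.val := by
      apply UInt32.toNat_inj.mp; exact htn
    exact Char.ext hv
  rw [← hce]
  exact List.getElem_mem hlen

-- A's first-matching-key scan computes exactly Source B's _digit
theorem pvKeyOfA_eq (c : Char) : pvKeyOfA c pvLettersA = pvDigitB c := by
  by_cases hc : c ∈ pvLowerLetters
  · fin_cases hc <;> decide
  · have hgroups : ∀ pr ∈ pvLettersA, ∀ x ∈ pr.2, x ∈ pvLowerLetters := by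
      intro pr hpr
      fin_cases hpr <;> (intro x hx; fin_cases hx <;> decide)
    have hA : ∀ L, (∀ pr ∈ L, ∀ x ∈ pr.2, x ∈ pvLowerLetters) → pvKeyOfA c L = none := by
      intro L
      induction L with
      | nil => intro _; rfl
      | cons pr rest ihL =>
        intro hall
        rw [pvKeyOfA]
        have hcont : pr.2.contains c = false := by
          simp only [List.contains_eq_mem, decide_eq_false_iff_not]
          intro hx
          exact hc (hall pr List.mem_cons_self c hx)
        simp only [hcont, Bool.false_eq_true, if_false]
        exact ihL (fun q hq => hall q (List.mem_cons_of_mem _ hq))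
    have hB : pvDigitB c = none := by
      rw [pvDigitB, if_neg]
      rintro ⟨h1, h2⟩
      exact hc (pvMem_lower_of_range c h1 h2)
    rw [hA pvLettersA hgroups, hB]

theorem pvFoldl_match (f : Char → Option Char) : ∀ (w : List Char) (acc : List Char),
    w.foldl (fun a c => match f c with | some k => a ++ [k] | none => a) acc
      = acc ++ w.filterMap f := by
  intro w
  induction w with
  | nil => intro acc; simp
  | cons c cs ih =>
    intro acc
    cases h : f c <;> simp [List.foldl_cons, h, ih]

theorem pvTranslateA_eq (w : List Char) :
    pvTranslateA w = w.filterMap pvDigitB := by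
  rw [pvTranslateA, pvFoldl_match, List.nil_append]
  have : (fun c => pvKeyOfA c pvLettersA) = pvDigitB := funext pvKeyOfA_eq
  rw [this]

theorem pvLower_isSome : ∀ c ∈ pvLowerLetters, (pvDigitB c).isSome := by
  intro c hc
  fin_cases hc <;> decide

-- the head of the table for a suffix looks up the first occurrence of a digit in that suffix
theorem pvNxtTab_ne_nil (p : List Char) (i : Int) : pvNxtTab p i ≠ [] := by
  cases p <;> simp [pvNxtTab]

theorem pvNxt_head (p : List Char) : ∀ (i : Int) (d : Char),
    PySem.Dict.get? ((pvNxtTab p i).headD PySem.Dict.empty) d =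
      (match p.findIdx? (· == d) with
        | none => none
        | some m => some (i + (m : Int))) := by
  induction p with
  | nil => intro i d; simp [pvNxtTab, PySem.Dict.get?, PySem.Dict.empty]
  | cons c rest ih =>
    intro i d
    rw [pvNxtTab]
    simp only [List.headD_cons]
    rw [PySem.Dict.get?_insert]
    by_cases hdc : d = c
    · subst hdc
      simp [List.findIdx?_cons]
    · rw [if_neg hdc]
      have h2 : (c == d) = false := by simpa using Ne.symm hdc
      rw [ih (i + 1) d]
      simp only [List.findIdx?_cons, h2, Bool.false_eq_true, if_false]
      cases hr : rest.findIdx? (· == d) with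
      | none => simp
      | some m =>
        simp only [Option.map_some]
        congr 1
        push_cast
        ring

-- element pos of the table is the head of the table for the suffix from pos
theorem pvNxt_getD : ∀ (p : List Char) (i : Int) (pos : Nat), pos ≤ p.length →
    (pvNxtTab p i).getD pos PySem.Dict.empty
      = (pvNxtTab (p.drop pos) (i + (pos : Int))).headD PySem.Dict.empty := by
  intro p
  induction p with
  | nil =>
    intro i pos h
    simp only [List.length_nil, Nat.le_zero] at h
    subst h
    simp [pvNxtTab]
  | cons c rest ih =>
    intro i pos h
    cases pos with
    | zero =>
      simp only [List.drop_zero, Nat.cast_zero, add_zero]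
      cases hp : pvNxtTab (c :: rest) i with
      | nil => exact absurd hp (pvNxtTab_ne_nil _ _)
      | cons a t => simp
    | succ k =>
      rw [pvNxtTab]
      simp only [List.getD_cons_succ, List.drop_succ_cons]
      rw [ih (i + 1) k (by simpa using h)]
      congr 2
      push_cast
      ring

-- B's jump loop is the greedy check of the word's translation against the remaining phone suffix
theorem pvMatchB_eq (p : List Char) : ∀ (w : List Char) (pos : Nat), pos ≤ p.length →
    pvMatchB (pvNxtTab p 0) w (pos : Int) = pvSubG (p.drop pos) (w.filterMap pvDigitB) := by
  intro w
  induction w with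
  | nil => intro pos h; simp [pvMatchB, List.filterMap_nil, pvSubG_nil_right]
  | cons ch rest ih =>
    intro pos h
    rw [pvMatchB]
    cases hd : pvDigitB ch with
    | none => simp only [List.filterMap_cons, hd]; exact ih pos h
    | some d =>
      simp only [List.filterMap_cons, hd]
      have hget : PySem.List.pyGetD (pvNxtTab p 0) (pos : Int) PySem.Dict.empty
          = (pvNxtTab (p.drop pos) ((pos : Nat) : Int)).headD PySem.Dict.empty := by
        rw [PySem.List.pyGetD_natCast, pvNxt_getD p 0 pos h]
        norm_num
      rw [hget, pvNxt_head, pvSubG_cons_find]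
      cases hidx : (p.drop pos).findIdx? (· == d) with
      | none => simp
      | some m =>
        simp only []
        have hm : m < (p.drop pos).length := (List.findIdx?_eq_some_iff_findIdx_eq.mp hidx).1
        rw [List.length_drop] at hm
        have hlen : pos + m + 1 ≤ p.length := by omega
        have hcast : ((pos : Int) + (m : Int)) + 1 = ((pos + m + 1 : Nat) : Int) := by push_cast; ring
        rw [hcast, ih _ hlen]
        simp [List.drop_drop, Nat.add_assoc]

-- ===== VERDICT =====
theorem PhoneNumberLetterSubstring_spec : Claim_equal_PhoneNumberLetterSubstring := by
  intro pn wl _ hpre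
  unfold Spec_PhoneNumberLetterSubstring
  simp only [PhoneNumberLetterSubstring, PhoneNumberLetterSubstring_alt]
  rw [PySem.List.foldl_append_singleton_eq_map, List.nil_append]
  rw [PySem.List.foldl_append_if_eq_filter, List.nil_append]
  rw [show ([] : List Char) = pvTranslateA "".toList from rfl]
  simp only [PySem.List.pyGetD_map, List.length_map]
  rw [PySem.List.foldl_pyRange_zero_pyGetD' wl ""
    (fun acc w => if pvIsSubseqA pn.toList (pvTranslateA w.toList) then acc ++ [w] else acc) []]
  rw [PySem.List.foldl_append_if_eq_filter, List.nil_append]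
  apply List.filter_congr
  intro w hw
  unfold Pre_PhoneNumberLetterSubstring at hpre
  simp only [List.all_eq_true, List.any_eq_true, List.contains_eq_mem, decide_eq_true_eq] at hpre
  obtain ⟨c, hc, hcl⟩ := hpre w hw
  have hsome := pvLower_isSome c hcl
  obtain ⟨d, hd⟩ := Option.isSome_iff_exists.mp hsome
  have htmem : d ∈ w.toList.filterMap pvDigitB :=
    List.mem_filterMap.mpr ⟨c, hc, hd⟩
  have htne : w.toList.filterMap pvDigitB ≠ [] :=
    List.ne_nil_of_mem htmem
  have hlen : 0 < (w.toList.filterMap pvDigitB).length :=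
    List.length_pos_of_ne_nil htne
  rw [pvTranslateA_eq]
  rw [pvIsSubseqA, pvIsSubseqGo_eq pn.toList _ 0 hlen, List.drop_zero]
  have hB := pvMatchB_eq pn.toList w.toList 0 (Nat.zero_le _)
  simp only [Nat.cast_zero, List.drop_zero] at hB
  exact hB.symm
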